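-- pv_equiv track=rewrite | github.com/chvjak/srm724 | orandsum.py | isPossibleDP
-- ===== SOURCE A (Python) =====
-- def isPossibleDP(OR, SUM, CARRY = 0):
--
--     if len(SUM) == 0 and len(OR) != 0:
--         return False
--
--     if len(OR) == 0:
--         if len(SUM) == 0 and CARRY == 0:
--             return True
--         elif len(SUM) == 1 and CARRY == 1:
--             return True
--         else:
--             return False
--
--     # a = 0, b = 0, c = 0
--     if OR[-1] == 0 and SUM[-1] == 0 and CARRY == 0:
--         res = isPossibleDP(OR[:-1], SUM[:-1], 0)
--
--     # a = 0, b = 0, c = 1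
--     elif OR[-1] == 0 and SUM[-1] == 1 and CARRY == 1:
--         res = isPossibleDP(OR[:-1], SUM[:-1], 0)
--
--     # a = 1, b = 1, c = 0
--     elif OR[-1] == 1 and SUM[-1] == 0 and CARRY == 0:
--         res = isPossibleDP(OR[:-1], SUM[:-1], 1)
--
--     # a = 1, b = 0, c = 1
--     elif OR[-1] == 1 and SUM[-1] == 0 and CARRY == 1:
--         res = isPossibleDP(OR[:-1], SUM[:-1], 1)
--
--     # a = 1, b = 0, c = 0
--     elif OR[-1] == 1 and SUM[-1] == 1 and CARRY == 0:
--         res = isPossibleDP(OR[:-1], SUM[:-1], 0)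
--
--     # a = 1, b = 1, c = 1
--     elif OR[-1] == 1 and SUM[-1] == 1 and CARRY == 1:
--         res = isPossibleDP(OR[:-1], SUM[:-1], 1)
--
--     else:
--         return False
--
--     return res
-- ===== SOURCE B (Python) =====
-- def isPossibleDP(OR, SUM, CARRY=0):
--     # Single backward pass with a carry variable; no list slicing.
--     if len(OR) > len(SUM):
--         return False
--     carry = CARRY
--     for o, s in zip(reversed(OR), reversed(SUM)):
--         if (o, s, carry) in ((0, 0, 0), (0, 1, 1), (1, 1, 0)):
--             carry = 0
--         elif (o, s, carry) in ((1, 0, 0), (1, 0, 1), (1, 1, 1)):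
--             carry = 1
--         else:
--             return False
--     rest = len(SUM) - len(OR)
--     return (rest == 0 and carry == 0) or (rest == 1 and carry == 1)
-- ===== Notes on version B (the rewrite author's own statement) =====
-- stated objective: alternative
-- what changed: Replaced A's recursion that slices both lists (OR[:-1], SUM[:-1]) at every step with a single iterative backward pass over zip(reversed(OR), reversed(SUM)) carrying one variable, plus an upfront len(OR) > len(SUM) rejection.
import Mathlib
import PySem

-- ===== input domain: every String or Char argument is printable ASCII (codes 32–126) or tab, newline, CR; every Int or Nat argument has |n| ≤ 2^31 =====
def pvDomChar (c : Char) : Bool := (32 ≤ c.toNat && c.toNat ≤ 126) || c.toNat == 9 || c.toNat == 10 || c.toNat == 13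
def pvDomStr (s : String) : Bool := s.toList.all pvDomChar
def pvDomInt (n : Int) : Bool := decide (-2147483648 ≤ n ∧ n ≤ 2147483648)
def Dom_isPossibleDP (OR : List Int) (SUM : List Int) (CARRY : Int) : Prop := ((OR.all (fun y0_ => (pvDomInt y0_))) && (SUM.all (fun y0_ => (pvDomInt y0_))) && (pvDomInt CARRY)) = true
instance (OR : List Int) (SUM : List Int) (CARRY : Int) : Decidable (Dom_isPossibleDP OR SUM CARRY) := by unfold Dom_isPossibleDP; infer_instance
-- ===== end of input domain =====

-- B replaces A's recursion-with-slicing by one iterative backward zip pass with a carry variable; exact same results.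

-- ===== PORT A =====
-- literal transliteration of A: recursion peeling the last element via pyGet? (-1) / slice [:-1]
def isPossibleDP (OR : List Int) (SUM : List Int) (CARRY : Int) : Bool :=
  if SUM.length = 0 ∧ OR.length ≠ 0 then false
  else if OR.length = 0 then
    if SUM.length = 0 ∧ CARRY = 0 then true
    else if SUM.length = 1 ∧ CARRY = 1 then true
    else false
  else
    match PySem.List.pyGet? OR (-1), PySem.List.pyGet? SUM (-1) with
    | some o, some s =>
      if o = 0 ∧ s = 0 ∧ CARRY = 0 then
        isPossibleDP (PySem.List.slice OR none (some (-1))) (PySem.List.slice SUM none (some (-1))) 0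
      else if o = 0 ∧ s = 1 ∧ CARRY = 1 then
        isPossibleDP (PySem.List.slice OR none (some (-1))) (PySem.List.slice SUM none (some (-1))) 0
      else if o = 1 ∧ s = 0 ∧ CARRY = 0 then
        isPossibleDP (PySem.List.slice OR none (some (-1))) (PySem.List.slice SUM none (some (-1))) 1
      else if o = 1 ∧ s = 0 ∧ CARRY = 1 then
        isPossibleDP (PySem.List.slice OR none (some (-1))) (PySem.List.slice SUM none (some (-1))) 1
      else if o = 1 ∧ s = 1 ∧ CARRY = 0 then
        isPossibleDP (PySem.List.slice OR none (some (-1))) (PySem.List.slice SUM none (some (-1))) 0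
      else if o = 1 ∧ s = 1 ∧ CARRY = 1 then
        isPossibleDP (PySem.List.slice OR none (some (-1))) (PySem.List.slice SUM none (some (-1))) 1
      else false
    | _, _ => false   -- unreachable: both lists are nonempty here
termination_by OR.length
decreasing_by
  all_goals simp [PySem.List.slice_to_neg_one, List.length_dropLast]; omega

-- ===== PORT B =====
-- one transition of B's loop body; none = early `return False`
def altStep (carry : Option Int) (p : Int × Int) : Option Int :=
  match carry with
  | none => none
  | some c =>
    if (p.1 = 0 ∧ p.2 = 0 ∧ c = 0) ∨ (p.1 = 0 ∧ p.2 = 1 ∧ c = 1) ∨ (p.1 = 1 ∧ p.2 = 1 ∧ c = 0) then some 0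
    else if (p.1 = 1 ∧ p.2 = 0 ∧ c = 0) ∨ (p.1 = 1 ∧ p.2 = 0 ∧ c = 1) ∨ (p.1 = 1 ∧ p.2 = 1 ∧ c = 1) then some 1
    else none

def isPossibleDP_alt (OR : List Int) (SUM : List Int) (CARRY : Int) : Bool :=
  if OR.length > SUM.length then false
  else
    match (OR.reverse.zip SUM.reverse).foldl altStep (some CARRY) with
    | none => false
    | some c =>
      let rest : Int := (SUM.length : Int) - (OR.length : Int)
      (rest == 0 && c == 0) || (rest == 1 && c == 1)

-- ===== PRECONDITION & SPEC =====
def Spec_isPossibleDP (OR : List Int) (SUM : List Int) (CARRY : Int) (out : Bool) : Prop := out = isPossibleDP_alt OR SUM CARRY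
instance (OR : List Int) (SUM : List Int) (CARRY : Int) (out : Bool) : Decidable (Spec_isPossibleDP OR SUM CARRY out) := by unfold Spec_isPossibleDP; infer_instance

-- ===== CLAIM (what is proved, stated in full; the proofs are below) =====
def Claim_equal_isPossibleDP : Prop := ∀ (OR : List Int) (SUM : List Int) (CARRY : Int), Dom_isPossibleDP OR SUM CARRY → Spec_isPossibleDP OR SUM CARRY (isPossibleDP OR SUM CARRY)

-- ===== LEMMAS AND PROOFS =====

theorem foldl_altStep_none (l : List (Int × Int)) : l.foldl altStep none = none := by
  induction l with
  | nil => rfl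
  | cons p t ih => simpa [altStep] using ih

-- B on snoc'ed inputs = one altStep then B on the shorter inputs
theorem alt_snoc (or' sum' : List Int) (o s c : Int) :
    isPossibleDP_alt (or' ++ [o]) (sum' ++ [s]) c =
      match altStep (some c) (o, s) with
      | some c' => isPossibleDP_alt or' sum' c'
      | none => false := by
  rcases h : altStep (some c) (o, s) with _ | c'
  · unfold isPossibleDP_alt
    simp [foldl_altStep_none, h]
  · unfold isPossibleDP_alt
    simp only [List.length_append, List.length_cons, List.length_nil, List.reverse_append,
      List.reverse_singleton, List.singleton_append, List.zip_cons_cons, List.foldl_cons, h]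
    rcases hf : (or'.reverse.zip sum'.reverse).foldl altStep (some c') with _ | cfin
    · split_ifs <;> simp
    · simp only [hf]
      split_ifs with h1 h2 h2
    




      · rfl
      · omega
      · omega
      · have e : ((sum'.length : Int) + 1) - ((or'.length : Int) + 1)
            = (sum'.length : Int) - (or'.length : Int) := by ring
        push_cast
        rw [e]

theorem main_eq (OR SUM : List Int) (CARRY : Int) :
    isPossibleDP OR SUM CARRY = isPossibleDP_alt OR SUM CARRY := by
  induction hn : OR.length using Nat.strong_induction_on generalizing OR SUM CARRY with
  | _ n ih =>
  rcases List.eq_nil_or_concat OR with hOR | ⟨or', o, hOR⟩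
  · subst hOR
    unfold isPossibleDP isPossibleDP_alt
    rcases SUM with _ | ⟨s, t⟩
    · by_cases h : CARRY = 0 <;> simp [h]
    · rcases t with _ | ⟨s2, t2⟩
      · by_cases h : CARRY = 1 <;> simp [h] <;> try omega
      · by_cases h0 : CARRY = 0 <;> by_cases h1 : CARRY = 1 <;>
          simp [h0, h1] <;> try omega
  · rw [List.concat_eq_append] at hOR
    subst hOR
    rcases List.eq_nil_or_concat SUM with hS | ⟨sum', s, hS⟩
    · subst hS
      unfold isPossibleDP isPossibleDP_alt
      simp
    · rw [List.concat_eq_append] at hS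
      subst hS
      rw [alt_snoc]
      have hlt : or'.length < n := by
        subst hn
        simp only [List.length_append, List.length_cons, List.length_nil]
        omega
      unfold isPossibleDP
      have hne : ¬ ((sum' ++ [s]).length = 0 ∧ ¬ (or' ++ [o]).length = 0) := by simp
      have hne2 : ¬ ((or' ++ [o]).length = 0) := by simp
      simp only [hne, hne2, if_false,
        PySem.List.pyGet?_neg_one_append_singleton, PySem.List.slice_to_neg_one,
        List.dropLast_concat]
      by_cases h1 : o = 0 ∧ s = 0 ∧ CARRY = 0
      · simp [h1, altStep, ih _ hlt or' sum' 0 rfl]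
      · by_cases h2 : o = 0 ∧ s = 1 ∧ CARRY = 1
        · simp [h2, altStep, ih _ hlt or' sum' 0 rfl]
          try (intro h; exact absurd h2.2.2 (by omega))
        · by_cases h3 : o = 1 ∧ s = 0 ∧ CARRY = 0
          · simp [h1, h2, h3, altStep, ih _ hlt or' sum' 1 rfl]
          · by_cases h4 : o = 1 ∧ s = 0 ∧ CARRY = 1
            · simp [h1, h2, h3, h4, altStep, ih _ hlt or' sum' 1 rfl]
            · by_cases h5 : o = 1 ∧ s = 1 ∧ CARRY = 0
              · simp [h1, h2, h3, h4, h5, altStep, ih _ hlt or' sum' 0 rfl]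
              · by_cases h6 : o = 1 ∧ s = 1 ∧ CARRY = 1
                · simp [h1, h2, h3, h4, h5, h6, altStep, ih _ hlt or' sum' 1 rfl]
                · simp [h1, h2, h3, h4, h5, h6, altStep]
                  try tauto

-- ===== VERDICT (by name: the statement is the Claim_ definition above) =====
theorem isPossibleDP_spec : Claim_equal_isPossibleDP := by
  intro OR SUM CARRY _
  exact main_eq OR SUM CARRY
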